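-- pv_equiv track=rewrite | github.com/tgkei/Algorithm_study | by_python/2019_winter_naver_hack/a.py | solution
-- ===== SOURCE A (Python) =====
-- def solution(grade):
--     answer = 0
--     smallest = grade[-1]
--     for g in grade[-2::-1]:
--         if smallest < g:
--             answer += g-smallest
--         else:
--             smallest = g
--     return answer
-- ===== SOURCE B (Python) =====
-- def solution(grade):
--     n = len(grade)
--     suffix_min = [0] * n
--     suffix_min[n - 1] = grade[n - 1]   # IndexError on empty input, as in A
--     for i in range(n - 2, -1, -1):
--         suffix_min[i] = min(suffix_min[i + 1], grade[i])
--     answer = 0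
--     for i in range(n - 1):
--         if grade[i] > suffix_min[i + 1]:
--             answer += grade[i] - suffix_min[i + 1]
--     return answer
-- ===== Notes on version B (the rewrite author's own statement) =====
-- stated objective: alternative
-- what changed: Replaces A's single fused reverse scan with running min by a two-phase decomposition: first build a suffix-minimum table right-to-left, then a separate forward pass sums grade[i] - suffix_min[i+1] where positive.
import Mathlib
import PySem

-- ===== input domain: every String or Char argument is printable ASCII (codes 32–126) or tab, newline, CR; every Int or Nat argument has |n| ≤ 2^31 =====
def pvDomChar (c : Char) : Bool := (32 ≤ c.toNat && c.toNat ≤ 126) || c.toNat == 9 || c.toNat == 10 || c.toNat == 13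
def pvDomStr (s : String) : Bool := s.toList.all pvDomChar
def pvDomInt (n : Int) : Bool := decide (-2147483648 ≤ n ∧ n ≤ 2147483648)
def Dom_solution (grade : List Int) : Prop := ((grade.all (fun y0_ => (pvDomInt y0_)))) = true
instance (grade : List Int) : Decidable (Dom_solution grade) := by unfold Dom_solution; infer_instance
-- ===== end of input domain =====

-- B replaces A's fused reverse scan by a suffix-minimum table plus a forward summing pass (alternative decomposition, same cost).

-- ===== PORT A =====
def solution (grade : List Int) : Int :=
  match PySem.List.pyGet? grade (-1) with
  | none => 0  -- unreachable under Pre_solution (grade ≠ []): Python raises IndexError here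
  | some smallest0 =>
    -- grade[-2::-1]: hand-ported, exact = the reversal of grade without its last element
    ((grade.dropLast.reverse).foldl
      (fun (p : Int × Int) g => if p.2 < g then (p.1 + (g - p.2), p.2) else (p.1, g))
      (0, smallest0)).1

-- ===== PORT B =====
-- right-to-left fill of Source B's suffix-minimum table, as the obvious structural recursion
def sufMin : List Int → List Int
  | [] => []
  | [x] => [x]
  | x :: y :: ys =>
    let s := sufMin (y :: ys)
    (min (s.headD 0) x) :: s

def solution_alt (grade : List Int) : Int :=
  let suf := sufMin grade
  -- forward pass over i = 0 .. n-2, pairing grade[i] with suffix_min[i+1]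
  (List.zip grade (suf.drop 1)).foldl
    (fun a (p : Int × Int) => if p.1 > p.2 then a + (p.1 - p.2) else a) 0

-- ===== PRECONDITION & SPEC =====
-- Pre_ excludes only the empty list, on which A raises IndexError (grade[-1]); B raises there too.
def Pre_solution (grade : List Int) : Prop := grade ≠ []
instance (grade : List Int) : Decidable (Pre_solution grade) := by unfold Pre_solution; infer_instance
def pvWitness_solution : List Int := ([3, 1, 2])

def Spec_solution (grade : List Int) (out : Int) : Prop := out = solution_alt grade
instance (grade : List Int) (out : Int) : Decidable (Spec_solution grade out) := by unfold Spec_solution; infer_instance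

-- ===== CLAIM (what is proved, stated in full; the proofs are below) =====
def Claim_equal_solution : Prop := ∀ (grade : List Int), Dom_solution grade → Pre_solution grade → Spec_solution grade (solution grade)

-- ===== LEMMAS AND PROOFS =====

-- A's fold step, named
def fA (p : Int × Int) (g : Int) : Int × Int :=
  if p.2 < g then (p.1 + (g - p.2), p.2) else (p.1, g)

-- B's fold step, named
def fB (a : Int) (p : Int × Int) : Int :=
  if p.1 > p.2 then a + (p.1 - p.2) else a

lemma getLast?_eq_getLastD : ∀ (zs : List Int) (z d : Int),
    (z :: zs).getLast? = some ((z :: zs).getLastD d) := by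
  intro zs
  induction zs with
  | nil => intro z d; rfl
  | cons w ws ih => intro z d; simpa using ih w z

lemma getLastD_indep (zs : List Int) (z d d' : Int) :
    (z :: zs).getLastD d = (z :: zs).getLastD d' := by
  have h1 := getLast?_eq_getLastD zs z d
  have h2 := getLast?_eq_getLastD zs z d'
  rw [h1] at h2; exact (Option.some.inj h2).symm

lemma solution_eq_fold (z : Int) (zs : List Int) :
    solution (z :: zs) = (((z :: zs).dropLast.reverse).foldl fA (0, (z :: zs).getLastD 0)).1 := by
  show (match PySem.List.pyGet? (z :: zs) (-1) with
        | none => 0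
        | some s0 => (((z :: zs).dropLast.reverse).foldl fA (0, s0)).1) = _
  rw [PySem.List.pyGet?_neg_one, getLast?_eq_getLastD zs z 0]

lemma fA_foldl_snd (ys : List Int) : ∀ a s : Int, (ys.foldl fA (a, s)).2 = ys.foldl min s := by
  induction ys with
  | nil => intro a s; rfl
  | cons g ys ih =>
    intro a s
    simp only [List.foldl_cons, fA]
    split_ifs with h
    · rw [ih]; congr 1; omega
    · rw [ih]; congr 1; omega

lemma fB_foldl_shift (l : List (Int × Int)) : ∀ a : Int,
    l.foldl fB a = a + l.foldl fB 0 := by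
  induction l with
  | nil => intro a; simp [List.foldl]
  | cons p l ih =>
    intro a
    simp only [List.foldl_cons, fB]
    split_ifs with h
    · rw [ih, ih (0 + (p.1 - p.2))]; ring
    · exact ih a

lemma sufMin_cons_ne_nil (x : Int) (xs : List Int) : sufMin (x :: xs) ≠ [] := by
  cases xs <;> simp [sufMin]

lemma solution_alt_eq_fold (grade : List Int) :
    solution_alt grade = (List.zip grade ((sufMin grade).drop 1)).foldl fB 0 := rfl

-- main combined induction: equality of the two ports and agreement of the two "minimum" values
lemma key : ∀ (xs : List Int), xs ≠ [] →
    solution xs = solution_alt xs ∧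
    (xs.dropLast.reverse).foldl min (xs.getLastD 0) = (sufMin xs).headD 0 := by
  intro xs
  induction xs with
  | nil => intro h; exact absurd rfl h
  | cons x t ih =>
    intro _
    cases t with
    | nil =>
      constructor
      · rw [solution_eq_fold]; rfl
      · rfl
    | cons y ys =>
      obtain ⟨ihEq, ihMin⟩ := ih (by simp)
      -- notation
      set t := y :: ys with ht
      obtain ⟨m, rest, hsm⟩ : ∃ m rest, sufMin t = m :: rest := by
        rcases hne : sufMin t with _ | ⟨m, rest⟩
        · exact absurd hne (sufMin_cons_ne_nil y ys)
        · exact ⟨m, rest, rfl⟩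
      have hm : (sufMin t).headD 0 = m := by rw [hsm]; rfl
      have hdrop : (x :: t).dropLast.reverse = t.dropLast.reverse ++ [x] := by
        simp [ht]
      have hlast : (x :: t).getLastD 0 = t.getLastD 0 := by
        show (t.getLastD x) = t.getLastD 0
        exact getLastD_indep ys y x 0
      -- inner fold state of A on the tail
      have hfst : ((t.dropLast.reverse).foldl fA (0, t.getLastD 0)).1 = solution t := by
        rw [solution_eq_fold y ys]
      have hsnd : ((t.dropLast.reverse).foldl fA (0, t.getLastD 0)).2 = m := by
        rw [fA_foldl_snd, ihMin, hm]
      -- A on x :: t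
      have hA : solution (x :: t) = if m < x then solution t + (x - m) else solution t := by
        rw [solution_eq_fold x t, hdrop, hlast, List.foldl_append]
        have hstate : (t.dropLast.reverse).foldl fA (0, t.getLastD 0) = (solution t, m) :=
          Prod.ext_iff.mpr ⟨hfst, hsnd⟩
        rw [hstate]
        show (fA (solution t, m) x).1 = _
        simp only [fA]
        split_ifs <;> rfl
      -- sufMin on x :: t
      have hsmx : sufMin (x :: t) = min m x :: sufMin t := by
        show (min ((sufMin t).headD 0) x) :: sufMin t = _
        rw [hm]
      -- B on x :: t
      have hB : solution_alt (x :: t) = (if x > m then x - m else 0) + solution_alt t := by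
        rw [solution_alt_eq_fold, hsmx]
        show (List.zip (x :: t) (sufMin t)).foldl fB 0 = _
        rw [hsm]
        show List.foldl fB (fB 0 (x, m)) (List.zip t rest) = _
        rw [fB_foldl_shift]
        have : solution_alt t = (List.zip t rest).foldl fB 0 := by
          rw [solution_alt_eq_fold, hsm]; rfl
        rw [← this]
        simp only [fB]
        split_ifs <;> ring
      constructor
      · rw [hA, hB, ihEq]
        split_ifs <;> omega
      · rw [hdrop, hlast, List.foldl_append, ihMin, hm, hsmx]
        rfl

-- ===== VERDICT (by name: the statement is the Claim_ definition above) =====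
theorem solution_spec : Claim_equal_solution := by
  intro grade _ hpre
  exact (key grade hpre).1
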